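-- pv_equiv track=rewrite | github.com/nebriv/vtolMapMaker | lib/helpers.py | splitColor
-- ===== SOURCE A (Python) =====
-- def splitColor(color, count):
--     splits = []
--     i = 0
--     while i < count:
--         if color > 255:
--             splits.append(255)
--             color = color - 255
--         elif color > 0:
--             splits.append(color)
--             color = color - 255
--         else:
--             splits.append(0)
--         i += 1
--     return splits
-- ===== SOURCE B (Python) =====
-- def splitColor(color, count):
--     return [max(0, min(255, color - 255 * i)) for i in range(count)]
-- ===== Notes on version B (the rewrite author's own statement) =====
-- stated objective: simpler
-- what changed: Replaces the stateful while-loop that mutates a running remainder with a closed-form comprehension computing element i directly as max(0, min(255, color - 255*i)).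
import Mathlib
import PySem

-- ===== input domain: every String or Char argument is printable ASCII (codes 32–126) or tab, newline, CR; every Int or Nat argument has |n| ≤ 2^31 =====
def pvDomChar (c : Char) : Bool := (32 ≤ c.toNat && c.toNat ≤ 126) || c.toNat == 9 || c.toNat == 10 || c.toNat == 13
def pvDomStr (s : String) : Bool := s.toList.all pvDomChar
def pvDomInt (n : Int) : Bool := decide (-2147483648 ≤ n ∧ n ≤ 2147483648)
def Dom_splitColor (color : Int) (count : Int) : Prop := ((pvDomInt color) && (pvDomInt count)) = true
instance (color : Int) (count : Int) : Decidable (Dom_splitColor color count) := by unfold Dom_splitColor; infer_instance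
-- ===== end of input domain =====

-- B replaces A's stateful remainder-mutating loop with a closed-form per-index formula.
-- ===== PORT A =====
-- while i < count: three branches mutating color; fuel = number of remaining iterations
def splitColorLoop (color : Int) (splits : List Int) : Nat → List Int
  | 0 => splits
  | n+1 =>
    if color > 255 then splitColorLoop (color - 255) (splits ++ [255]) n
    else if color > 0 then splitColorLoop (color - 255) (splits ++ [color]) n
    else splitColorLoop color (splits ++ [0]) n

def splitColor (color : Int) (count : Int) : List Int :=
  splitColorLoop color [] count.toNat

-- ===== PORT B =====
-- [max(0, min(255, color - 255*i)) for i in range(count)]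
def splitColor_alt (color : Int) (count : Int) : List Int :=
  (PySem.List.pyRange 0 count 1).map (fun i => max 0 (min 255 (color - 255 * i)))

-- ===== PRECONDITION & SPEC =====
def Spec_splitColor (color : Int) (count : Int) (out : List Int) : Prop := out = splitColor_alt color count
instance (color : Int) (count : Int) (out : List Int) : Decidable (Spec_splitColor color count out) := by unfold Spec_splitColor; infer_instance

-- ===== CLAIM (what is proved, stated in full; the proofs are below) =====
def Claim_equal_splitColor : Prop := ∀ (color : Int) (count : Int), Dom_splitColor color count → Spec_splitColor color count (splitColor color count)

-- ===== LEMMAS AND PROOFS =====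

-- ===== VERDICT (by name: the statement is the Claim_ definition above) =====
lemma splitColorLoop_eq (n : Nat) : ∀ (color : Int) (acc : List Int),
    splitColorLoop color acc n =
      acc ++ (List.range n).map (fun (k : Nat) => max 0 (min 255 (color - 255 * (k : Int)))) := by
  induction n with
  | zero => intro color acc; simp [splitColorLoop]
  | succ m ih =>
    intro color acc
    have key : (List.range (m+1)).map (fun k : Nat => max 0 (min 255 (color - 255 * (k : Int))))
        = max 0 (min 255 color) ::
          (List.range m).map (fun k : Nat => max 0 (min 255 ((color - 255) - 255 * (k : Int)))) := by
      rw [List.range_succ_eq_map, List.map_cons, List.map_map]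
      congr 1
      · norm_num
      · apply List.map_congr_left
        intro k _
        simp only [Function.comp_apply]
        push_cast
        ring_nf
    rw [key]
    show splitColorLoop color acc (m+1) = _
    simp only [splitColorLoop]
    split_ifs with h1 h2
    · rw [ih]
      have h255 : max 0 (min 255 color) = 255 := by omega
      rw [h255]
      simp
    · rw [ih]
      have hc : max 0 (min 255 color) = color := by omega
      rw [hc]
      simp
    · -- color ≤ 0: every element is 0 on both sides
      rw [ih]
      have h0 : max 0 (min 255 color) = 0 := by omega
      have hz1 : (List.range m).map (fun k : Nat => max 0 (min 255 (color - 255 * (k : Int))))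
          = (List.range m).map (fun _ : Nat => (0 : Int)) := by
        apply List.map_congr_left
        intro k _
        have hk := Int.natCast_nonneg k
        have : color - 255 * (k : Int) ≤ 0 := by nlinarith
        omega
      have hz2 : (List.range m).map (fun k : Nat => max 0 (min 255 ((color - 255) - 255 * (k : Int))))
          = (List.range m).map (fun _ : Nat => (0 : Int)) := by
        apply List.map_congr_left
        intro k _
        have hk := Int.natCast_nonneg k
        have : (color - 255) - 255 * (k : Int) ≤ 0 := by nlinarith
        omega
      rw [hz1, hz2, h0]
      simp

-- ===== VERDICT (by name: the statement is the Claim_ definition above) =====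
theorem splitColor_spec : Claim_equal_splitColor := by
  intro color count _
  unfold Spec_splitColor splitColor splitColor_alt
  rw [splitColorLoop_eq, PySem.List.pyRange_one, List.map_map]
  simp only [List.nil_append, Int.sub_zero]
  apply List.map_congr_left
  intro k _
  simp
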